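-- pv_equiv track=rewrite | github.com/michaelmilleryoder/wikipedia-research-scripts | classify_sources.py | classify_citations
-- ===== SOURCE A (Python) =====
-- def classify_citations(citations):
--     isr_srcs = [['Jerusalem Post', 'jpost'],
--                     ['Jewish Virtual Library', 'jewishvirtuallibrary'],
--                     ['Aloni Shlomo', 'Shlomo'],
--                     ['Avraham Sela', 'Sela'],
--                     ['Anti-Defamation League', 'adl'],
--                 ['Menachem Klein', 'Klein', 'klein'],
--                 ['gov.il'],
--                 ['Jewish Journal', 'jewishjournal'],
--                 ['Ynetnews', 'ynetnews'],
--                 ['Intelligence and Terrorism Information Center', 'terrorism-info.org.il', 'intelligence.org.il']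
--                 ]
--     pal_srcs = [["Ma'an", 'Maan'],
--                 ["Finkelstein"],
--                 ["Human Rights Watch", 'hrw.org'],
--                ["Amnesty International"],
--                ["Edward Said", "Said"],
--                ["B'Tselem", 'btselem'],
--                ['Al-haq', 'alhaq'],
--                 ['Foundation for Middle East Peace', 'fmep'],
--                 ['Qumsiyeh', 'qumsiyeh'],
--                 ['Palestine Monitor', 'palestinemonitor'],
--                 ['Anti-War.com', 'anti-war.com'],
--                 ['Al-Ahram', 'al-ahram']
--                ]
--
--     isr_citations = []
--     pal_citations = []
--     neutral_citations = []
--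
--     for citation in citations:
--         isr_match = False
--         pal_match = False
--
--         for isr_src in isr_srcs:
--             if any(name in citation for name in isr_src):
--                 isr_match = True
--                 break
--         for pal_src in pal_srcs:
--             if any(name in citation for name in pal_src):
--                 pal_match = True
--                 break
--         if isr_match and pal_match:
--             neutral_citations.append(citation)
--         elif isr_match:
--             isr_citations.append(citation)
--         elif pal_match:
--             pal_citations.append(citation)
--         else:
--             neutral_citations.append(citation)
--
--     return (isr_citations, pal_citations, neutral_citations)
-- ===== SOURCE B (Python) =====
-- ISR_NAMES = ['Jerusalem Post', 'jpost', 'Jewish Virtual Library', 'jewishvirtuallibrary',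
--              'Aloni Shlomo', 'Shlomo', 'Avraham Sela', 'Sela', 'Anti-Defamation League', 'adl',
--              'Menachem Klein', 'Klein', 'klein', 'gov.il', 'Jewish Journal', 'jewishjournal',
--              'Ynetnews', 'ynetnews', 'Intelligence and Terrorism Information Center',
--              'terrorism-info.org.il', 'intelligence.org.il']
-- PAL_NAMES = ["Ma'an", 'Maan', 'Finkelstein', 'Human Rights Watch', 'hrw.org',
--              'Amnesty International', 'Edward Said', 'Said', "B'Tselem", 'btselem',
--              'Al-haq', 'alhaq', 'Foundation for Middle East Peace', 'fmep',
--              'Qumsiyeh', 'qumsiyeh', 'Palestine Monitor', 'palestinemonitor',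
--              'Anti-War.com', 'anti-war.com', 'Al-Ahram', 'al-ahram']
--
--
-- def _by_first(names):
--     index = {}
--     for n in names:
--         index.setdefault(n[0], []).append(n)
--     return index
--
--
-- ISR_BY_FIRST = _by_first(ISR_NAMES)
-- PAL_BY_FIRST = _by_first(PAL_NAMES)
-- _EMPTY = []
--
--
-- def classify_citations(citations):
--     buckets = {'isr': [], 'pal': [], 'neu': []}
--     for c in citations:
--         isr = pal = False
--         for i, ch in enumerate(c):
--             if not isr and any(c.startswith(n, i) for n in ISR_BY_FIRST.get(ch, _EMPTY)):
--                 isr = True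
--             if not pal and any(c.startswith(n, i) for n in PAL_BY_FIRST.get(ch, _EMPTY)):
--                 pal = True
--             if isr and pal:
--                 break
--         key = 'neu' if isr == pal else ('isr' if isr else 'pal')
--         buckets[key].append(c)
--     return (buckets['isr'], buckets['pal'], buckets['neu'])
-- ===== Notes on version B (the rewrite author's own statement) =====
-- stated objective: faster
-- what changed: Replaces A's per-name 'in' substring scans over nested source groups and the append branch chain by a first-character index of the names (dict char -> candidate names) and a single left-to-right sweep over each citation that tests only the indexed candidates as prefixes at each position, with early exit once both sides matched, dispatching into a dict of buckets.
import Mathlib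
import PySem

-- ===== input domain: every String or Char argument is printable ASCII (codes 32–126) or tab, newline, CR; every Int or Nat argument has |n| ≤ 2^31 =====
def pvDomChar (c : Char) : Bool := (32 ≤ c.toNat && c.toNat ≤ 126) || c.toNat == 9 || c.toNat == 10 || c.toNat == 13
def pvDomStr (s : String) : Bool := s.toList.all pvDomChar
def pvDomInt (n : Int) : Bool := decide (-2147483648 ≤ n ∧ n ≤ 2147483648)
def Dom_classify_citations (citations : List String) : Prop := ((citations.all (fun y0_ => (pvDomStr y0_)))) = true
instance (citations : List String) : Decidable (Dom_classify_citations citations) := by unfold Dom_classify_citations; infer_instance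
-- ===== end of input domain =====

-- B replaces A's per-name substring scans over nested groups and the append branch chain by a
-- first-character index of the names and a single left-to-right sweep over each citation testing
-- only the indexed candidate names as prefixes at each position (early exit once both sides
-- matched), with dict-bucket dispatch (objective: faster; measured).

-- ===== PORT A =====
def pvIsrSrcs : List (List String) :=
  [["Jerusalem Post", "jpost"],
   ["Jewish Virtual Library", "jewishvirtuallibrary"],
   ["Aloni Shlomo", "Shlomo"],
   ["Avraham Sela", "Sela"],
   ["Anti-Defamation League", "adl"],
   ["Menachem Klein", "Klein", "klein"],
   ["gov.il"],
   ["Jewish Journal", "jewishjournal"],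
   ["Ynetnews", "ynetnews"],
   ["Intelligence and Terrorism Information Center", "terrorism-info.org.il", "intelligence.org.il"]]

def pvPalSrcs : List (List String) :=
  [["Ma'an", "Maan"],
   ["Finkelstein"],
   ["Human Rights Watch", "hrw.org"],
   ["Amnesty International"],
   ["Edward Said", "Said"],
   ["B'Tselem", "btselem"],
   ["Al-haq", "alhaq"],
   ["Foundation for Middle East Peace", "fmep"],
   ["Qumsiyeh", "qumsiyeh"],
   ["Palestine Monitor", "palestinemonitor"],
   ["Anti-War.com", "anti-war.com"],
   ["Al-Ahram", "al-ahram"]]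

-- A's loop body: the two for/break flag loops (= List.any over the groups), then the branch chain.
def pvStepA (acc : List String × List String × List String) (citation : String) :
    List String × List String × List String :=
  let isr_match := pvIsrSrcs.any (fun src => src.any (fun name => PySem.Str.isIn name citation))
  let pal_match := pvPalSrcs.any (fun src => src.any (fun name => PySem.Str.isIn name citation))
  if isr_match && pal_match then (acc.1, acc.2.1, acc.2.2 ++ [citation])
  else if isr_match then (acc.1 ++ [citation], acc.2.1, acc.2.2)
  else if pal_match then (acc.1, acc.2.1 ++ [citation], acc.2.2)
  else (acc.1, acc.2.1, acc.2.2 ++ [citation])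

def classify_citations (citations : List String) : List String × List String × List String :=
  citations.foldl pvStepA ([], [], [])

-- ===== PORT B =====
def pvIsrNames : List String :=
  ["Jerusalem Post", "jpost", "Jewish Virtual Library", "jewishvirtuallibrary",
   "Aloni Shlomo", "Shlomo", "Avraham Sela", "Sela", "Anti-Defamation League", "adl",
   "Menachem Klein", "Klein", "klein", "gov.il", "Jewish Journal", "jewishjournal",
   "Ynetnews", "ynetnews", "Intelligence and Terrorism Information Center",
   "terrorism-info.org.il", "intelligence.org.il"]

def pvPalNames : List String :=
  ["Ma'an", "Maan", "Finkelstein", "Human Rights Watch", "hrw.org",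
   "Amnesty International", "Edward Said", "Said", "B'Tselem", "btselem",
   "Al-haq", "alhaq", "Foundation for Middle East Peace", "fmep",
   "Qumsiyeh", "qumsiyeh", "Palestine Monitor", "palestinemonitor",
   "Anti-War.com", "anti-war.com", "Al-Ahram", "al-ahram"]

-- B's first-character index: index.setdefault(n[0], []).append(n)  (n[0] exact here: every name
-- in the literal lists is nonempty)
def pvByFirst (names : List String) : PySem.Dict Char (List String) :=
  names.foldl (fun d n => PySem.Dict.modify d (n.toList.headD ' ') [] (fun l => l ++ [n]))
    PySem.Dict.empty

def pvIsrByFirst : PySem.Dict Char (List String) := pvByFirst pvIsrNames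
def pvPalByFirst : PySem.Dict Char (List String) := pvByFirst pvPalNames

-- B's inner loop: 'for i, ch in enumerate(c)' walking the suffixes of c, at each position testing
-- only the names indexed under ch (c.startswith(n, i) is exact: n is a prefix of the suffix c[i:]);
-- break when both flags are set, flags returned when the string is exhausted.
def pvScanB (tail : List Char) (isr pal : Bool) : Bool × Bool :=
  match tail with
  | [] => (isr, pal)
  | ch :: rest =>
    let isr' := isr || (pvIsrByFirst.getD ch []).any
        (fun n => PySem.Chars.startswith (ch :: rest) n.toList)
    let pal' := pal || (pvPalByFirst.getD ch []).any
        (fun n => PySem.Chars.startswith (ch :: rest) n.toList)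
    if isr' && pal' then (isr', pal') else pvScanB rest isr' pal'

def pvStepB (b : PySem.Dict String (List String)) (c : String) : PySem.Dict String (List String) :=
  let r := pvScanB c.toList false false
  let key := if r.1 == r.2 then "neu" else if r.1 then "isr" else "pal"
  PySem.Dict.modify b key [] (fun l => l ++ [c])

def classify_citations_alt (citations : List String) : List String × List String × List String :=
  let buckets := citations.foldl pvStepB
      (PySem.Dict.mk [("isr", []), ("pal", []), ("neu", [])])
  (buckets.getD "isr" [], buckets.getD "pal" [], buckets.getD "neu" [])

-- ===== PRECONDITION & SPEC =====
def Spec_classify_citations (citations : List String) (out : List String × List String × List String) : Prop := out = classify_citations_alt citations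
instance (citations : List String) (out : List String × List String × List String) : Decidable (Spec_classify_citations citations out) := by unfold Spec_classify_citations; infer_instance

-- ===== CLAIM (what is proved, stated in full; the proofs are below) =====
def Claim_equal_classify_citations : Prop := ∀ (citations : List String), Dom_classify_citations citations → Spec_classify_citations citations (classify_citations citations)

-- ===== LEMMAS AND PROOFS =====

-- the canonical per-citation label both programs are shown to compute
def pvLabel (c : String) : String :=
  let isr := pvIsrNames.any (fun n => PySem.Str.isIn n c)
  let pal := pvPalNames.any (fun n => PySem.Str.isIn n c)
  if isr == pal then "neu" else if isr then "isr" else "pal"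

theorem pvIsrNames_eq : pvIsrNames = pvIsrSrcs.flatten := rfl
theorem pvPalNames_eq : pvPalNames = pvPalSrcs.flatten := rfl

theorem pv_any_or (names : List String) (f g : String → Bool) :
    names.any (fun n => f n || g n) = (names.any f || names.any g) := by
  rw [Bool.eq_iff_iff]; simp [List.any_eq_true]
  constructor
  · rintro ⟨x, hx, h | h⟩
    · exact Or.inl ⟨x, hx, h⟩
    · exact Or.inr ⟨x, hx, h⟩
  · rintro (⟨x, hx, h⟩ | ⟨x, hx, h⟩)
    · exact ⟨x, hx, Or.inl h⟩
    · exact ⟨x, hx, Or.inr h⟩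

-- 'sub in s' unfolds one suffix position: a prefix match here, or a match further right
theorem pv_isIn_cons (n : List Char) (c : Char) (rest : List Char) :
    PySem.Chars.isIn n (c :: rest)
      = (PySem.Chars.startswith (c :: rest) n || PySem.Chars.isIn n rest) := by
  rw [Bool.eq_iff_iff]
  simp [PySem.Chars.isIn_iff_infix, PySem.Chars.startswith_iff, List.infix_cons_iff]

theorem pvByFirst_getD (names : List String) (d : PySem.Dict Char (List String)) (ch : Char) :
    (names.foldl (fun d n => PySem.Dict.modify d (n.toList.headD ' ') [] (fun l => l ++ [n])) d).getD ch []
      = d.getD ch [] ++ names.filter (fun n => n.toList.headD ' ' == ch) := by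
  induction names generalizing d with
  | nil => simp
  | cons n ns ih =>
    rw [List.foldl_cons, ih, List.filter_cons, PySem.Dict.getD_modify]
    simp only [List.headD_eq_head?_getD]
    by_cases h : n.toList.head?.getD ' ' = ch
    · rw [if_pos h.symm, if_pos (by simpa using h), h, List.append_assoc, List.singleton_append]
    · rw [if_neg (fun e => h e.symm), if_neg (by simpa using h)]

-- the ch-bucket holds exactly the names that can match at a position whose character is ch
theorem pv_filter_any_startswith (names : List String) (ch : Char) (rest : List Char)
    (h : ∀ n ∈ names, n.toList ≠ []) :
    (names.filter (fun n => n.toList.headD ' ' == ch)).any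
        (fun n => PySem.Chars.startswith (ch :: rest) n.toList)
      = names.any (fun n => PySem.Chars.startswith (ch :: rest) n.toList) := by
  induction names with
  | nil => simp
  | cons n ns ih =>
    have hn : n.toList ≠ [] := h n (List.mem_cons_self ..)
    have hns : ∀ m ∈ ns, m.toList ≠ [] := fun m hm => h m (List.mem_cons_of_mem _ hm)
    rw [List.filter_cons]
    obtain ⟨c', cs, hcc⟩ : ∃ c' cs, n.toList = c' :: cs := by
      cases hx : n.toList with
      | nil => exact absurd hx hn
      | cons a l => exact ⟨a, l, rfl⟩
    by_cases hc : c' = ch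
    · rw [if_pos (by simp [hcc, hc]), List.any_cons, List.any_cons, ih hns]
    · have hsw : PySem.Chars.startswith (ch :: rest) n.toList = false := by
        rw [hcc, ← Bool.not_eq_true, PySem.Chars.startswith_iff, List.cons_prefix_cons]
        exact fun hpre => hc hpre.1
      rw [if_neg (by simp [hcc, hc]), List.any_cons, hsw, Bool.false_or, ih hns]

theorem pv_bucket_isr (ch : Char) (rest : List Char) :
    (pvIsrByFirst.getD ch []).any (fun n => PySem.Chars.startswith (ch :: rest) n.toList)
      = pvIsrNames.any (fun n => PySem.Chars.startswith (ch :: rest) n.toList) := by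
  have h : pvIsrByFirst.getD ch [] = pvIsrNames.filter (fun n => n.toList.headD ' ' == ch) := by
    rw [pvIsrByFirst, pvByFirst, pvByFirst_getD]; simp
  rw [h, pv_filter_any_startswith]
  decide

theorem pv_bucket_pal (ch : Char) (rest : List Char) :
    (pvPalByFirst.getD ch []).any (fun n => PySem.Chars.startswith (ch :: rest) n.toList)
      = pvPalNames.any (fun n => PySem.Chars.startswith (ch :: rest) n.toList) := by
  have h : pvPalByFirst.getD ch [] = pvPalNames.filter (fun n => n.toList.headD ' ' == ch) := by
    rw [pvPalByFirst, pvByFirst, pvByFirst_getD]; simp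
  rw [h, pv_filter_any_startswith]
  decide

-- the sweep computes exactly the two substring-membership flags
theorem pvScanB_spec (tail : List Char) (isr pal : Bool) :
    pvScanB tail isr pal
      = (isr || pvIsrNames.any (fun n => PySem.Chars.isIn n.toList tail),
         pal || pvPalNames.any (fun n => PySem.Chars.isIn n.toList tail)) := by
  induction tail generalizing isr pal with
  | nil =>
    rw [pvScanB]
    rw [show pvIsrNames.any (fun n => PySem.Chars.isIn n.toList ([] : List Char)) = false by decide,
        show pvPalNames.any (fun n => PySem.Chars.isIn n.toList ([] : List Char)) = false by decide]
    simp
  | cons ch rest ih =>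
    rw [pvScanB]
    simp only [pv_bucket_isr, pv_bucket_pal, pv_isIn_cons, pv_any_or, ← Bool.or_assoc]
    split
    · rename_i h
      rw [Bool.and_eq_true] at h
      simp [h.1, h.2]
    · rename_i h
      rw [ih]

-- A's loop body appends the citation to the bucket named by pvLabel
theorem pvStepA_eq (acc : List String × List String × List String) (c : String) :
    pvStepA acc c =
      (if pvLabel c == "isr" then (acc.1 ++ [c], acc.2.1, acc.2.2)
       else if pvLabel c == "pal" then (acc.1, acc.2.1 ++ [c], acc.2.2)
       else (acc.1, acc.2.1, acc.2.2 ++ [c])) := by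
  unfold pvStepA pvLabel
  rw [show (pvIsrSrcs.any fun src => src.any fun name => PySem.Str.isIn name c)
        = pvIsrNames.any (fun n => PySem.Str.isIn n c) by rw [pvIsrNames_eq]; simp,
      show (pvPalSrcs.any fun src => src.any fun name => PySem.Str.isIn name c)
        = pvPalNames.any (fun n => PySem.Str.isIn n c) by rw [pvPalNames_eq]; simp]
  cases hi : pvIsrNames.any (fun n => PySem.Str.isIn n c) <;>
    cases hp : pvPalNames.any (fun n => PySem.Str.isIn n c) <;> simp

-- loop invariant for A: the three accumulators collect the citations of each label in order
theorem foldA (cs : List String) (i p n : List String) :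
    cs.foldl pvStepA (i, p, n)
      = (i ++ cs.filter (fun c => pvLabel c == "isr"),
         p ++ cs.filter (fun c => pvLabel c == "pal"),
         n ++ cs.filter (fun c => pvLabel c == "neu")) := by
  induction cs generalizing i p n with
  | nil => simp
  | cons c cs ih =>
    have htr : pvLabel c = "isr" ∨ pvLabel c = "pal" ∨ pvLabel c = "neu" := by
      simp only [pvLabel]; split_ifs <;> simp
    rw [List.foldl_cons, pvStepA_eq]
    rcases htr with h | h | h <;> simp [h, ih, List.append_assoc]

-- B's key expression is the same label
theorem pvKeyB_eq (c : String) :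
    (if (pvScanB c.toList false false).1 == (pvScanB c.toList false false).2 then "neu"
     else if (pvScanB c.toList false false).1 then "isr" else "pal") = pvLabel c := by
  rw [pvScanB_spec]
  unfold pvLabel
  simp [PySem.Str.isIn]

-- dict-modify on the three-bucket literal dict
theorem pv_modify_isr (i p n : List String) (f : List String → List String) :
    (PySem.Dict.modify (PySem.Dict.mk [("isr", i), ("pal", p), ("neu", n)]) "isr" [] f)
      = PySem.Dict.mk [("isr", f i), ("pal", p), ("neu", n)] := by
  simp [PySem.Dict.modify, PySem.Dict.getD, PySem.Dict.get?, PySem.Dict.insert, List.find?]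

theorem pv_modify_pal (i p n : List String) (f : List String → List String) :
    (PySem.Dict.modify (PySem.Dict.mk [("isr", i), ("pal", p), ("neu", n)]) "pal" [] f)
      = PySem.Dict.mk [("isr", i), ("pal", f p), ("neu", n)] := by
  simp [PySem.Dict.modify, PySem.Dict.getD, PySem.Dict.get?, PySem.Dict.insert, List.find?]

theorem pv_modify_neu (i p n : List String) (f : List String → List String) :
    (PySem.Dict.modify (PySem.Dict.mk [("isr", i), ("pal", p), ("neu", n)]) "neu" [] f)
      = PySem.Dict.mk [("isr", i), ("pal", p), ("neu", f n)] := by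
  simp [PySem.Dict.modify, PySem.Dict.getD, PySem.Dict.get?, PySem.Dict.insert, List.find?]

-- loop invariant for B: the dict keeps its three buckets, each collecting its label's citations
theorem foldB (cs : List String) (i p n : List String) :
    cs.foldl pvStepB (PySem.Dict.mk [("isr", i), ("pal", p), ("neu", n)])
      = PySem.Dict.mk
          [("isr", i ++ cs.filter (fun c => pvLabel c == "isr")),
           ("pal", p ++ cs.filter (fun c => pvLabel c == "pal")),
           ("neu", n ++ cs.filter (fun c => pvLabel c == "neu"))] := by
  induction cs generalizing i p n with
  | nil => simp
  | cons c cs ih =>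
    have hstep : pvStepB (PySem.Dict.mk [("isr", i), ("pal", p), ("neu", n)]) c
        = (if pvLabel c == "isr" then PySem.Dict.mk [("isr", i ++ [c]), ("pal", p), ("neu", n)]
           else if pvLabel c == "pal" then PySem.Dict.mk [("isr", i), ("pal", p ++ [c]), ("neu", n)]
           else PySem.Dict.mk [("isr", i), ("pal", p), ("neu", n ++ [c])]) := by
      simp only [pvStepB]
      rw [pvKeyB_eq]
      have htr : pvLabel c = "isr" ∨ pvLabel c = "pal" ∨ pvLabel c = "neu" := by
        simp only [pvLabel]; split_ifs <;> simp
      rcases htr with h | h | h <;>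
        simp [h, pv_modify_isr, pv_modify_pal, pv_modify_neu]
    rw [List.foldl_cons, hstep]
    have htr : pvLabel c = "isr" ∨ pvLabel c = "pal" ∨ pvLabel c = "neu" := by
      simp only [pvLabel]; split_ifs <;> simp
    rcases htr with h | h | h <;> simp [h, ih, List.append_assoc]

-- ===== VERDICT (by name: the statement is the Claim_ definition above) =====
theorem classify_citations_spec : Claim_equal_classify_citations := by
  intro citations _
  unfold Spec_classify_citations classify_citations classify_citations_alt
  rw [foldA, foldB]
  simp [PySem.Dict.getD, PySem.Dict.get?, List.find?]
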